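-- pv_equiv track=rewrite | github.com/itsDNNS/docsight | app/modules/modulation/engine.py | _modulation_periods
-- ===== SOURCE A (Python) =====
-- def _modulation_periods(timeline):
--     """Collapse consecutive same-modulation observations into periods.
--
--     Input: [(time, label, qam), ...]
--     Returns: [(start_time, end_time, label, qam, count)]
--     """
--     if not timeline:
--         return []
--
--     periods = []
--     current_start = timeline[0][0]
--     current_label = timeline[0][1]
--     current_qam = timeline[0][2]
--     current_end = current_start
--     count = 1
--
--     for i in range(1, len(timeline)):
--         t, label, qam = timeline[i]
--         if label == current_label:
--             current_end = t
--             count += 1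
--         else:
--             periods.append((current_start, current_end, current_label, current_qam, count))
--             current_start = t
--             current_label = label
--             current_qam = qam
--             current_end = t
--             count = 1
--
--     periods.append((current_start, current_end, current_label, current_qam, count))
--     return periods
-- ===== SOURCE B (Python) =====
-- def _modulation_periods(timeline):
--     """Collapse consecutive same-modulation observations into periods.
--
--     Staged: first compute the boundary indices where a new label run begins
--     (plus the final length), then build each period from an index pair.
--     """
--     n = len(timeline)
--     cuts = [i for i in range(n) if i == 0 or timeline[i][1] != timeline[i - 1][1]] + [n]
--     return [
--         (timeline[s][0], timeline[e - 1][0], timeline[s][1], timeline[s][2], e - s)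
--         for s, e in zip(cuts, cuts[1:])
--     ]
-- ===== Notes on version B (the rewrite author's own statement) =====
-- stated objective: alternative
-- what changed: Replaces A's single pass with mutable run-state by a staged index computation: first a list of boundary indices where the label changes (plus the length), then each period is built directly from a consecutive index pair.
import Mathlib
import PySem

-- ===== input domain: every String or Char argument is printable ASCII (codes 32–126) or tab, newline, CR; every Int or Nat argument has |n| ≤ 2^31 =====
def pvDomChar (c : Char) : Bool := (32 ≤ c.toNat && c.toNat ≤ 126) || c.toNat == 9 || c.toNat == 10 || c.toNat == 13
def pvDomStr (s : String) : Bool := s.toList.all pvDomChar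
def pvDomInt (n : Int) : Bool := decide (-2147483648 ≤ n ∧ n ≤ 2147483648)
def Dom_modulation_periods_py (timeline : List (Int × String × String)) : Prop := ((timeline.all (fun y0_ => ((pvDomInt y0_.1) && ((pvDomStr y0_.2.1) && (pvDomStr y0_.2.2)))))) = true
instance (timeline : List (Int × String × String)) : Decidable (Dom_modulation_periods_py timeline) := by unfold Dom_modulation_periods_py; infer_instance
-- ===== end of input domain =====

-- B replaces A's single pass with mutable run-state by a staged computation: first the
-- boundary indices where the label changes, then one period per consecutive index pair
-- (alternative decomposition; same cost). Equivalence proved on all inputs.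

-- ===== PORT A =====
-- A's for-loop over timeline[1:], carrying (start, end, label, qam, count) and appending
-- the finished period on a label change; the trailing append is the base case.
def modPerALoop (rest : List (Int × String × String)) (cs ce : Int) (cl cq : String)
    (cnt : Int) : List (Int × Int × String × String × Int) :=
  match rest with
  | [] => [(cs, ce, cl, cq, cnt)]
  | (t, label, qam) :: rs =>
    if label == cl then
      modPerALoop rs cs t cl cq (cnt + 1)
    else
      (cs, ce, cl, cq, cnt) :: modPerALoop rs t t label qam 1

def modulation_periods_py (timeline : List (Int × String × String)) :
    List (Int × Int × String × String × Int) :=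
  match timeline with
  | [] => []
  | (t0, l0, q0) :: rest => modPerALoop rest t0 t0 l0 q0 1

-- ===== PORT B =====
-- Source B indexes timeline[i] only at indices that are in range by construction (cut
-- indices < len, and e-1 with e ≥ 1), so getD with a dummy default is exact here.
def modPerGet (tl : List (Int × String × String)) (i : Nat) : Int × String × String :=
  tl.getD i (0, "", "")
def modPerCuts (tl : List (Int × String × String)) : List Nat :=
  ((List.range tl.length).filter
      (fun i => i == 0 || !((modPerGet tl i).2.1 == (modPerGet tl (i - 1)).2.1)))
    ++ [tl.length]

def modulation_periods_py_alt (timeline : List (Int × String × String)) :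
    List (Int × Int × String × String × Int) :=
  let cuts := modPerCuts timeline
  (cuts.zip cuts.tail).map (fun se =>
    ((modPerGet timeline se.1).1, (modPerGet timeline (se.2 - 1)).1,
      (modPerGet timeline se.1).2.1, (modPerGet timeline se.1).2.2,
      ((se.2 : Int) - (se.1 : Int))))

-- ===== PRECONDITION & SPEC =====
def Spec_modulation_periods_py (timeline : List (Int × String × String)) (out : List (Int × Int × String × String × Int)) : Prop := out = modulation_periods_py_alt timeline
instance (timeline : List (Int × String × String)) (out : List (Int × Int × String × String × Int)) : Decidable (Spec_modulation_periods_py timeline out) := by unfold Spec_modulation_periods_py; infer_instance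

-- ===== CLAIM (what is proved, stated in full; the proofs are below) =====
def Claim_equal_modulation_periods_py : Prop := ∀ (timeline : List (Int × String × String)), Dom_modulation_periods_py timeline → Spec_modulation_periods_py timeline (modulation_periods_py timeline)

-- ===== LEMMAS AND PROOFS =====

-- Proof-only canonical recursion on maximal equal-label runs; both ports are shown equal to it.
def modPerRuns (timeline : List (Int × String × String)) :
    List (Int × Int × String × String × Int) :=
  match timeline with
  | [] => []
  | (t, l, q) :: rest =>
    let run := rest.takeWhile (fun x => x.2.1 == l)
    let rest' := rest.dropWhile (fun x => x.2.1 == l)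
    (t, ((run.getLast?).map Prod.fst).getD t, l, q, (run.length : Int) + 1) ::
      modPerRuns rest'
termination_by timeline.length
decreasing_by
  simp only [List.length_cons]
  exact Nat.lt_succ_of_le (List.length_dropWhile_le _ _)

theorem modPerGet_append (pre ys : List (Int × String × String)) (j : Nat) :
    modPerGet (pre ++ ys) (pre.length + j) = modPerGet ys j := by
  simp [modPerGet, List.getD, List.getElem?_append_right (by omega : pre.length ≤ pre.length + j)]

theorem modPerGet_cons_succ (a : Int × String × String) (xs : List (Int × String × String)) (i : Nat) :
    modPerGet (a :: xs) (i + 1) = modPerGet xs i := by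
  simp [modPerGet]

theorem modPerCuts_sorted (tl : List (Int × String × String)) :
    (modPerCuts tl).Pairwise (· < ·) := by
  unfold modPerCuts
  rw [List.pairwise_append]
  refine ⟨(List.pairwise_lt_range).sublist List.filter_sublist, by simp, ?_⟩
  intro a ha b hb
  have := List.mem_range.mp (List.mem_of_mem_filter ha)
  simp at hb; omega

theorem modPerCuts_shape (tl : List (Int × String × String)) :
    modPerCuts tl = 0 :: (modPerCuts tl).tail ∧ ∀ x ∈ (modPerCuts tl).tail, 0 < x := by
  have hs := modPerCuts_sorted tl
  have hhd : modPerCuts tl = 0 :: (modPerCuts tl).tail := by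
    cases tl with
    | nil => rfl
    | cons a rest =>
      unfold modPerCuts
      rw [show (a :: rest).length = rest.length + 1 from rfl, List.range_succ_eq_map]
      simp
  refine ⟨hhd, ?_⟩
  rw [hhd] at hs
  intro x hx
  exact (List.pairwise_cons.mp hs).1 x hx

theorem modPerGet_append_left (xs ys : List (Int × String × String)) (n : Nat) (h : n < xs.length) :
    modPerGet (xs ++ ys) n = modPerGet xs n := by
  simp [modPerGet, List.getD, List.getElem?_append_left h]

theorem modPerCuts_cons (t : Int) (l q : String) (rest : List (Int × String × String)) :
    modPerCuts ((t, l, q) :: rest) =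
      0 :: (modPerCuts (rest.dropWhile (fun x => x.2.1 == l))).map
            (fun j => ((rest.takeWhile (fun x => x.2.1 == l)).length + 1) + j) := by
  set run := rest.takeWhile (fun x => x.2.1 == l) with hrun
  set rest' := rest.dropWhile (fun x => x.2.1 == l) with hrest'
  set k := run.length with hk
  have hsplit : run ++ rest' = rest := List.takeWhile_append_dropWhile
  have hlen : ((t, l, q) :: rest).length = (k + 1) + rest'.length := by
    rw [← hsplit]; simp; omega
  have hget2 : ∀ j, modPerGet ((t, l, q) :: rest) ((k + 1) + j) = modPerGet rest' j := by
    intro j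
    have h := modPerGet_append ((t, l, q) :: run) rest' j
    simpa [hsplit, Nat.add_comm, Nat.add_assoc, Nat.add_left_comm] using h
  have hlab : ∀ i, i ≤ k → (modPerGet ((t, l, q) :: rest) i).2.1 = l := by
    intro i hi
    cases i with
    | zero => simp [modPerGet]
    | succ n =>
      rw [modPerGet_cons_succ]
      have hn : n < run.length := by omega
      rw [← hsplit, modPerGet_append_left _ _ _ hn]
      have hmem : run[n] ∈ rest.takeWhile (fun x => x.2.1 == l) := List.getElem_mem hn
      have h' := List.mem_takeWhile_imp hmem
      have := eq_of_beq h'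
      simp [modPerGet, List.getD, List.getElem?_eq_getElem hn, this]
  have hdw : ∀ (xs : List (Int × String × String)) (y : Int × String × String) ys,
      xs.dropWhile (fun x => x.2.1 == l) = y :: ys → (y.2.1 == l) = false := by
    intro xs
    induction xs with
    | nil => intro y ys h; simp [List.dropWhile] at h
    | cons a as ih =>
      intro y ys h
      rw [List.dropWhile_cons] at h
      by_cases ha : (a.2.1 == l) = true
      · rw [if_pos ha] at h; exact ih y ys h
      · rw [if_neg ha] at h
        cases h
        simpa using ha
  have hfirst : rest' ≠ [] → ((modPerGet rest' 0).2.1 == l) = false := by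
    intro hne
    cases hr : rest' with
    | nil => exact absurd hr hne
    | cons y ys =>
      have hy := hdw rest y ys (by rw [← hrest']; exact hr)
      simp only [modPerGet, List.getD]
      simpa using hy
  unfold modPerCuts
  rw [hlen, List.range_add, List.filter_append]
  have h1 : (List.range (k + 1)).filter
      (fun i => i == 0 || !((modPerGet ((t,l,q)::rest) i).2.1 == (modPerGet ((t,l,q)::rest) (i - 1)).2.1)) = [0] := by
    rw [List.range_succ_eq_map, List.filter_cons_of_pos (by simp)]
    rw [List.filter_map]
    rw [List.filter_eq_nil_iff.mpr ?_, List.map_nil]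
    intro i hi
    have hik : i < k := List.mem_range.mp hi
    simp only [Function.comp]
    have e1 := hlab (i + 1) (by omega)
    have e2 := hlab i (by omega)
    simp [Nat.succ_eq_add_one, e1, e2]
  rw [h1]
  have h2 : ((List.range rest'.length).map (fun x => k + 1 + x)).filter
      (fun i => i == 0 || !((modPerGet ((t,l,q)::rest) i).2.1 == (modPerGet ((t,l,q)::rest) (i - 1)).2.1)) =
      ((List.range rest'.length).filter
      (fun i => i == 0 || !((modPerGet rest' i).2.1 == (modPerGet rest' (i - 1)).2.1))).map (fun x => k + 1 + x) := by
    rw [List.filter_map]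
    congr 1
    apply List.filter_congr
    intro j hj
    have hjm : j < rest'.length := List.mem_range.mp hj
    cases j with
    | zero =>
      have hne : rest' ≠ [] := by intro h; rw [h] at hjm; simp at hjm
      have hf := hfirst hne
      have hkk := hlab k (le_refl k)
      simp only [Function.comp]
      simp [hget2 0, hkk, hf]
    | succ n =>
      have e1 : (k + 1) + (n + 1) - 1 = (k + 1) + n := by omega
      simp only [Function.comp]
      rw [show ((k+1) + (n+1)) - 1 = (k+1) + n from by omega]
      simp [hget2 (n + 1), hget2 n]
  rw [h2]
  simp [List.map_append]

theorem modulation_periods_py_alt_eq_runs : ∀ (tl : List (Int × String × String)),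
    modulation_periods_py_alt tl = modPerRuns tl := by
  intro tl
  induction htl : tl.length using Nat.strong_induction_on generalizing tl with
  | _ N ih =>
  cases tl with
  | nil => simp [modulation_periods_py_alt, modPerCuts, modPerRuns]
  | cons hd rest =>
    obtain ⟨t, l, q⟩ := hd
    have hlt : (rest.dropWhile (fun x => x.2.1 == l)).length < N := by
      have := List.length_dropWhile_le (fun x => x.2.1 == l) rest
      simp at htl; omega
    have ihr := ih _ hlt (rest.dropWhile (fun x => x.2.1 == l)) rfl
    obtain ⟨hhd, hpos⟩ := modPerCuts_shape (rest.dropWhile (fun x => x.2.1 == l))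
    obtain ⟨cs, hcs⟩ : ∃ cs, modPerCuts (rest.dropWhile (fun x => x.2.1 == l)) = 0 :: cs := ⟨_, hhd⟩
    have hpos' : ∀ x ∈ cs, 0 < x := by
      rw [hcs] at hpos; simpa using hpos
    have hsplit : (rest.takeWhile (fun x => x.2.1 == l)) ++ rest.dropWhile (fun x => x.2.1 == l) = rest :=
      List.takeWhile_append_dropWhile
    have hget2 : ∀ j, modPerGet ((t, l, q) :: rest)
        (((rest.takeWhile (fun x => x.2.1 == l)).length + 1) + j) =
        modPerGet (rest.dropWhile (fun x => x.2.1 == l)) j := by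
      intro j
      have h := modPerGet_append ((t, l, q) :: (rest.takeWhile (fun x => x.2.1 == l)))
        (rest.dropWhile (fun x => x.2.1 == l)) j
      simpa [hsplit, Nat.add_comm, Nat.add_assoc, Nat.add_left_comm] using h
    rw [modPerRuns, ← ihr]
    unfold modulation_periods_py_alt
    rw [modPerCuts_cons, hcs]
    simp only [List.map_cons, List.tail_cons, List.zip_cons_cons, List.map_cons]
    rw [show ((fun j => ((rest.takeWhile (fun x => x.2.1 == l)).length + 1) + j) 0 ::
          cs.map (fun j => ((rest.takeWhile (fun x => x.2.1 == l)).length + 1) + j)) =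
        (0 :: cs).map (fun j => ((rest.takeWhile (fun x => x.2.1 == l)).length + 1) + j) from rfl]
    rw [List.zip_map, List.map_map]
    congr 1
    · -- head tuple
      have h0 : modPerGet ((t, l, q) :: rest) 0 = (t, l, q) := by simp [modPerGet]
      have hk : (modPerGet ((t, l, q) :: rest) ((rest.takeWhile (fun x => x.2.1 == l)).length)).1 =
          ((((rest.takeWhile (fun x => x.2.1 == l)).getLast?).map Prod.fst).getD t) := by
        cases hr : rest.takeWhile (fun x => x.2.1 == l) with
        | nil => simp [modPerGet]
        | cons y ys =>
          have hlen : ys.length < (y :: ys).length := by simp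
          rw [show (y :: ys).length = ys.length + 1 from rfl, modPerGet_cons_succ, ← hsplit, hr,
            modPerGet_append_left _ _ _ hlen]
          simp [modPerGet, List.getD, List.getLast?_eq_getElem?]
      simp only [h0]
      rw [show ((rest.takeWhile (fun x => x.2.1 == l)).length + 1) + 0 - 1 =
        (rest.takeWhile (fun x => x.2.1 == l)).length from by omega]
      rw [hk]
      simp
    · -- tail periods
      apply List.map_congr_left
      intro se hse
      obtain ⟨s, e⟩ := se
      have he : e ∈ cs := (List.of_mem_zip hse).2
      have hepos : 0 < e := hpos' e he
      simp only [Function.comp, Prod.map]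
      rw [show ((rest.takeWhile (fun x => x.2.1 == l)).length + 1) + e - 1 =
        ((rest.takeWhile (fun x => x.2.1 == l)).length + 1) + (e - 1) from by omega]
      rw [hget2 s, hget2 (e - 1)]
      simp only [Prod.mk.injEq]
      refine ⟨trivial, trivial, trivial, trivial, ?_⟩
      push_cast
      ring

theorem modPerALoop_eq (rest : List (Int × String × String)) (cs ce : Int) (cl cq : String)
    (cnt : Int) :
    modPerALoop rest cs ce cl cq cnt =
      (cs, (((rest.takeWhile (fun x => x.2.1 == cl)).getLast?).map Prod.fst).getD ce, cl, cq,
        cnt + ((rest.takeWhile (fun x => x.2.1 == cl)).length : Int)) ::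
      modPerRuns (rest.dropWhile (fun x => x.2.1 == cl)) := by
  induction rest generalizing cs ce cl cq cnt with
  | nil => simp [modPerALoop, modPerRuns]
  | cons hd tl ih =>
    obtain ⟨t, label, qam⟩ := hd
    by_cases h : (label == cl) = true
    · rw [modPerALoop]
      simp only [h, if_true]
      rw [ih]
      rcases htl : tl.takeWhile (fun x => x.2.1 == cl) with _ | ⟨a, as⟩
      · simp [h, htl]
      · rcases hl : (a :: as).getLast? with _ | b
        · simp at hl
        · simp [h, htl, List.getLast?_cons_cons, hl]
          omega
    · have hb : (label == cl) = false := by simpa using h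
      rw [modPerALoop]
      simp only [hb, Bool.false_eq_true, if_false]
      rw [ih]
      simp [modPerRuns, hb]
      omega

theorem modulation_periods_py_eq_runs (timeline : List (Int × String × String)) :
    modulation_periods_py timeline = modPerRuns timeline := by
  cases timeline with
  | nil => simp [modulation_periods_py, modPerRuns]
  | cons hd rest =>
    obtain ⟨t0, l0, q0⟩ := hd
    rw [modulation_periods_py, modPerALoop_eq]
    simp [modPerRuns, Int.add_comm]

-- ===== VERDICT (by name: the statement is the Claim_ definition above) =====
theorem modulation_periods_py_spec : Claim_equal_modulation_periods_py := by
  intro timeline _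
  unfold Spec_modulation_periods_py
  rw [modulation_periods_py_eq_runs, modulation_periods_py_alt_eq_runs]
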